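-- pv_equiv track=rewrite | github.com/ludolara/americasnlp2026 | src/test/eval_lora.py | _count_pending_generation_tasks
-- ===== SOURCE A (Python) =====
-- def _count_pending_generation_tasks(
--     candidate_store: list[list[str]],
--     generation_budget: int,
--     batch_size: int,
-- ) -> int:
--     total_tasks = 0
--     for round_index in range(generation_budget):
--         pending_examples = sum(1 for candidates in candidate_store if len(candidates) <= round_index)
--         if pending_examples > 0:
--             total_tasks += (pending_examples + batch_size - 1) // batch_size
--     return total_tasks
-- ===== SOURCE B (Python) =====
-- def _count_pending_generation_tasks(
--     candidate_store: list[list[str]],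
--     generation_budget: int,
--     batch_size: int,
-- ) -> int:
--     # Build a length-frequency table once, then keep a running count of
--     # pending examples per round: O(n + budget) instead of O(n * budget).
--     freq = {}
--     for candidates in candidate_store:
--         length = len(candidates)
--         if length < generation_budget:
--             freq[length] = freq.get(length, 0) + 1
--     total_tasks = 0
--     pending = 0
--     for round_index in range(generation_budget):
--         pending += freq.get(round_index, 0)
--         if pending > 0:
--             total_tasks += (pending + batch_size - 1) // batch_size
--     return total_tasks
-- ===== Notes on version B (the rewrite author's own statement) =====
-- stated objective: faster
-- what changed: Replaces the per-round rescan of candidate_store with a length-frequency dict built once and a running pending counter, so each round is O(1) instead of O(n).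
import Mathlib
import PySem

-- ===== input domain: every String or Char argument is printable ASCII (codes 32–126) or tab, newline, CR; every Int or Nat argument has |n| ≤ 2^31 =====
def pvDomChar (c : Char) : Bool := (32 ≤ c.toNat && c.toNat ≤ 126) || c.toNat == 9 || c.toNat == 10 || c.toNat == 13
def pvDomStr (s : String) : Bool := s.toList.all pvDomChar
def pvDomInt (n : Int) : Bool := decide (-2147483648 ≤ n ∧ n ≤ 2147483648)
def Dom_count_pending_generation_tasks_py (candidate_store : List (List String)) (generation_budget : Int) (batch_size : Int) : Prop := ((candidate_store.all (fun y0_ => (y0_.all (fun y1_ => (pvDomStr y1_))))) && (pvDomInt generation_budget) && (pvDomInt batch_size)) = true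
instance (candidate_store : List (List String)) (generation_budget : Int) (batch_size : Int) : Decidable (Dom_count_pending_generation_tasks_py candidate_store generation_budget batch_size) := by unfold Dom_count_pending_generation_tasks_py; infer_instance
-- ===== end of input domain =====

-- B replaces A's per-round rescan of candidate_store by a length-frequency dict built
-- once plus a running pending counter (O(n + budget) instead of O(n * budget)).

-- ===== PORT A =====
def count_pending_generation_tasks_py (candidate_store : List (List String)) (generation_budget : Int) (batch_size : Int) : Int :=
  (PySem.List.pyRange 0 generation_budget 1).foldl
    (fun total_tasks round_index =>
      let pending_examples : Int :=
        candidate_store.foldl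
          (fun acc candidates => if (candidates.length : Int) ≤ round_index then acc + 1 else acc) 0
      if pending_examples > 0 then
        total_tasks + PySem.Int.floordiv (pending_examples + batch_size - 1) batch_size
      else total_tasks) 0

-- ===== PORT B =====
def count_pending_generation_tasks_py_alt (candidate_store : List (List String)) (generation_budget : Int) (batch_size : Int) : Int :=
  let freq : PySem.Dict Int Int :=
    candidate_store.foldl
      (fun d candidates =>
        let length : Int := candidates.length
        if length < generation_budget then d.insert length (d.getD length 0 + 1) else d)
      PySem.Dict.empty
  ((PySem.List.pyRange 0 generation_budget 1).foldl
    (fun (st : Int × Int) round_index =>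
      let pending := st.2 + freq.getD round_index 0
      (if pending > 0 then
         st.1 + PySem.Int.floordiv (pending + batch_size - 1) batch_size
       else st.1, pending)) (0, 0)).1

-- ===== PRECONDITION & SPEC =====
-- Pre_ excludes exactly the inputs on which A raises ZeroDivisionError (batch_size = 0
-- while some round has a positive pending count); B raises there too.
def Pre_count_pending_generation_tasks_py (candidate_store : List (List String)) (generation_budget : Int) (batch_size : Int) : Prop :=
  batch_size ≠ 0 ∨ generation_budget ≤ 0 ∨ ∀ candidates ∈ candidate_store, generation_budget ≤ (candidates.length : Int)
instance (candidate_store : List (List String)) (generation_budget : Int) (batch_size : Int) : Decidable (Pre_count_pending_generation_tasks_py candidate_store generation_budget batch_size) := by unfold Pre_count_pending_generation_tasks_py; infer_instance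

def pvWitness_count_pending_generation_tasks_py : List (List String) × Int × Int := ([["a"], [], ["a", "b"]], 3, 2)

def Spec_count_pending_generation_tasks_py (candidate_store : List (List String)) (generation_budget : Int) (batch_size : Int) (out : Int) : Prop := out = count_pending_generation_tasks_py_alt candidate_store generation_budget batch_size
instance (candidate_store : List (List String)) (generation_budget : Int) (batch_size : Int) (out : Int) : Decidable (Spec_count_pending_generation_tasks_py candidate_store generation_budget batch_size out) := by unfold Spec_count_pending_generation_tasks_py; infer_instance

-- ===== CLAIM (what is proved, stated in full; the proofs are below) =====
def Claim_equal_count_pending_generation_tasks_py : Prop := ∀ (candidate_store : List (List String)) (generation_budget : Int) (batch_size : Int), Dom_count_pending_generation_tasks_py candidate_store generation_budget batch_size → Pre_count_pending_generation_tasks_py candidate_store generation_budget batch_size → Spec_count_pending_generation_tasks_py candidate_store generation_budget batch_size (count_pending_generation_tasks_py candidate_store generation_budget batch_size)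

-- ===== LEMMAS AND PROOFS =====

-- the frequency dict B builds is the counter of the lengths below the budget
lemma freq_getD (generation_budget r : Int) (l : List (List String)) (d : PySem.Dict Int Int) :
    (l.foldl
      (fun d candidates =>
        let length : Int := candidates.length
        if length < generation_budget then d.insert length (d.getD length 0 + 1) else d)
      d).getD r 0
    = d.getD r 0 + (((l.map (fun c => (c.length : Int))).filter (fun L => L < generation_budget)).count r : Int) := by
  induction l generalizing d with
  | nil => simp
  | cons c cs ih =>
    simp only [List.foldl_cons, List.map_cons, List.filter_cons]
    by_cases h : (c.length : Int) < generation_budget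
    · simp only [h, if_pos, decide_true, ih, PySem.Dict.getD_insert]
      by_cases hr : r = (c.length : Int)
      · simp [hr]; omega
      · simp [hr, Ne.symm hr]
    · simp [h, ih]

-- A's per-round generator-sum counts the lists of length ≤ round_index
lemma pendingA_eq (candidate_store : List (List String)) (r : Int) :
    candidate_store.foldl
      (fun acc candidates => if (candidates.length : Int) ≤ r then acc + 1 else acc) (0 : Int)
    = ((candidate_store.map (fun c => (c.length : Int))).countP (fun L => decide (L ≤ r)) : Int) := by
  simp only [PySem.List.foldl_ite_add_one, List.countP_map, zero_add]
  rfl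

lemma countP_le_split (l : List Int) (r : Int) :
    l.countP (fun L => decide (L ≤ r)) = l.countP (fun L => decide (L < r)) + l.count r := by
  induction l with
  | nil => simp
  | cons x xs ih =>
    simp [List.countP_cons, List.count_cons, ih]
    by_cases h1 : x ≤ r <;> by_cases h2 : x < r <;> by_cases h3 : x = r <;>
      simp [h1, h2, h3] <;> omega

-- counting below the budget is the same as counting among the kept lengths
lemma countP_filter_absorb (l : List Int) (gb r : Int) (h : r < gb) :
    (l.filter (fun L => L < gb)).countP (fun L => decide (L ≤ r)) = l.countP (fun L => decide (L ≤ r)) := by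
  rw [List.countP_filter]
  exact List.countP_congr (fun a _ => by by_cases ha : a ≤ r <;> simp [ha]; omega)

lemma countP_neg_zero (l : List (List String)) (gb : Int) :
    ((l.map (fun c => (c.length : Int))).filter (fun L => L < gb)).countP (fun L => decide (L < 0)) = 0 := by
  rw [List.countP_eq_zero]
  intro a ha
  simp only [List.mem_filter, List.mem_map] at ha
  obtain ⟨⟨c, _, rfl⟩, _⟩ := ha
  simp

-- main loop invariant: over the first n rounds the two folds agree, and B's running
-- pending counter equals the number of below-budget lengths < n
lemma main_loop (candidate_store : List (List String)) (generation_budget batch_size : Int) (n : Nat)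
    (hn : (n : Int) ≤ generation_budget) :
    ((PySem.List.pyRange 0 (n : Int) 1).foldl
      (fun total_tasks round_index =>
        if (candidate_store.foldl
            (fun acc candidates => if (candidates.length : Int) ≤ round_index then acc + 1 else acc) (0 : Int)) > 0 then
          total_tasks + PySem.Int.floordiv ((candidate_store.foldl
            (fun acc candidates => if (candidates.length : Int) ≤ round_index then acc + 1 else acc) (0 : Int)) + batch_size - 1) batch_size
        else total_tasks) 0
     = ((PySem.List.pyRange 0 (n : Int) 1).foldl
        (fun (st : Int × Int) round_index =>
          (if st.2 + (candidate_store.foldl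
            (fun d candidates =>
              let length : Int := candidates.length
              if length < generation_budget then d.insert length (d.getD length 0 + 1) else d)
            PySem.Dict.empty).getD round_index 0 > 0 then
             st.1 + PySem.Int.floordiv (st.2 + (candidate_store.foldl
            (fun d candidates =>
              let length : Int := candidates.length
              if length < generation_budget then d.insert length (d.getD length 0 + 1) else d)
            PySem.Dict.empty).getD round_index 0 + batch_size - 1) batch_size
           else st.1,
           st.2 + (candidate_store.foldl
            (fun d candidates =>
              let length : Int := candidates.length
              if length < generation_budget then d.insert length (d.getD length 0 + 1) else d)
            PySem.Dict.empty).getD round_index 0)) (0, 0)).1)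
    ∧ ((PySem.List.pyRange 0 (n : Int) 1).foldl
        (fun (st : Int × Int) round_index =>
          (if st.2 + (candidate_store.foldl
            (fun d candidates =>
              let length : Int := candidates.length
              if length < generation_budget then d.insert length (d.getD length 0 + 1) else d)
            PySem.Dict.empty).getD round_index 0 > 0 then
             st.1 + PySem.Int.floordiv (st.2 + (candidate_store.foldl
            (fun d candidates =>
              let length : Int := candidates.length
              if length < generation_budget then d.insert length (d.getD length 0 + 1) else d)
            PySem.Dict.empty).getD round_index 0 + batch_size - 1) batch_size
           else st.1,
           st.2 + (candidate_store.foldl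
            (fun d candidates =>
              let length : Int := candidates.length
              if length < generation_budget then d.insert length (d.getD length 0 + 1) else d)
            PySem.Dict.empty).getD round_index 0)) (0, 0)).2
      = (((candidate_store.map (fun c => (c.length : Int))).filter (fun L => L < generation_budget)).countP (fun L => decide (L < (n : Int))) : Int) := by
  induction n with
  | zero =>
    rw [PySem.List.pyRange_one_eq_nil (by norm_num)]
    refine ⟨rfl, ?_⟩
    simp only [List.foldl_nil, Nat.cast_zero]
    rw [countP_neg_zero]
    rfl
  | succ n ih =>
    have hn' : (n : Int) ≤ generation_budget := by push_cast at hn ⊢; omega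
    have hlt : (n : Int) < generation_budget := by push_cast at hn; omega
    obtain ⟨ih1, ih2⟩ := ih hn'
    have hrange : PySem.List.pyRange 0 ((n + 1 : Nat) : Int) 1
        = PySem.List.pyRange 0 (n : Int) 1 ++ [(n : Int)] := by
      push_cast
      exact PySem.List.pyRange_one_succ_right (by positivity)
    rw [hrange]
    simp only [List.foldl_append, List.foldl_cons, List.foldl_nil]
    have hpend :
        candidate_store.foldl
          (fun acc candidates => if (candidates.length : Int) ≤ (n : Int) then acc + 1 else acc) (0 : Int)
        = ((PySem.List.pyRange 0 (n : Int) 1).foldl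
            (fun (st : Int × Int) round_index =>
              (if st.2 + (candidate_store.foldl
                (fun d candidates =>
                  let length : Int := candidates.length
                  if length < generation_budget then d.insert length (d.getD length 0 + 1) else d)
                PySem.Dict.empty).getD round_index 0 > 0 then
                 st.1 + PySem.Int.floordiv (st.2 + (candidate_store.foldl
                (fun d candidates =>
                  let length : Int := candidates.length
                  if length < generation_budget then d.insert length (d.getD length 0 + 1) else d)
                PySem.Dict.empty).getD round_index 0 + batch_size - 1) batch_size
               else st.1,
               st.2 + (candidate_store.foldl
                (fun d candidates =>
                  let length : Int := candidates.length
                  if length < generation_budget then d.insert length (d.getD length 0 + 1) else d)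
                PySem.Dict.empty).getD round_index 0)) (0, 0)).2
          + (candidate_store.foldl
              (fun d candidates =>
                let length : Int := candidates.length
                if length < generation_budget then d.insert length (d.getD length 0 + 1) else d)
              PySem.Dict.empty).getD (n : Int) 0 := by
      rw [ih2, pendingA_eq, freq_getD]
      rw [← countP_filter_absorb (candidate_store.map (fun c => (c.length : Int))) generation_budget (n : Int) hlt]
      rw [countP_le_split]
      push_cast
      simp [PySem.Dict.getD_empty]
    constructor
    · rw [hpend, ih1]
    · show _ + _ = _
      rw [← hpend, pendingA_eq]
      rw [← countP_filter_absorb (candidate_store.map (fun c => (c.length : Int))) generation_budget (n : Int) hlt]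
      congr 1
      push_cast
      exact (List.countP_congr (fun a _ => by by_cases ha : a ≤ (n : Int) <;> simp [ha])).symm

-- ===== VERDICT (by name: the statement is the Claim_ definition above) =====
theorem count_pending_generation_tasks_py_spec : Claim_equal_count_pending_generation_tasks_py := by
  intro candidate_store generation_budget batch_size _ _
  unfold Spec_count_pending_generation_tasks_py
  unfold count_pending_generation_tasks_py count_pending_generation_tasks_py_alt
  by_cases hgb : generation_budget ≤ 0
  · rw [PySem.List.pyRange_one_eq_nil hgb]
    rfl
  · have hm := (main_loop candidate_store generation_budget batch_size generation_budget.toNat (by omega)).1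
    rw [show ((generation_budget.toNat : Nat) : Int) = generation_budget from by omega] at hm
    exact hm
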